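-- pv_equiv track=rewrite | github.com/GiorgioMB/Curvature-Transfer-Code | experiments/models.py | grid_graph
-- ===== SOURCE A (Python) =====
-- from typing import List, Tuple
--
-- def _add_undirected(
--         edges: set,
--         u: int,
--         v: int
--         ) -> None:
--     """
--     Insert an undirected edge (u, v) in canonical form (u < v); skip self-loops.
--     """
--     if u == v:
--         return
--     if u > v:
--         u, v = v, u
--     edges.add((u, v))
--
-- def grid_graph(
--         m: int,
--         n: int
--         ) -> Tuple[int, List[Tuple[int,int]]]:
--     """
--     m x n rectangular grid with 4-neighbor connectivity.
--     """
--     edges = set()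
--     def id(i,j): return i*n + j
--     for i in range(m):
--         for j in range(n):
--             if i+1 < m: _add_undirected(edges, id(i,j), id(i+1,j))
--             if j+1 < n: _add_undirected(edges, id(i,j), id(i,j+1))
--     return m*n, sorted(edges)
-- ===== SOURCE B (Python) =====
-- from typing import List, Tuple
--
-- def grid_graph(
--         m: int,
--         n: int
--         ) -> Tuple[int, List[Tuple[int, int]]]:
--     """
--     m x n rectangular grid with 4-neighbor connectivity.
--     Two staged passes build the horizontal edges and the vertical edges as
--     separate already-sorted lists; a linear two-pointer merge then combines
--     them into the sorted edge list (no set, no sort).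
--     """
--     if m <= 0 or n <= 0:
--         return m * n, []
--     horiz = [(i * n + j, i * n + j + 1) for i in range(m) for j in range(n - 1)]
--     vert = [(i * n + j, i * n + j + n) for i in range(m - 1) for j in range(n)]
--     edges = []
--     a = b = 0
--     while a < len(horiz) and b < len(vert):
--         if horiz[a] < vert[b]:
--             edges.append(horiz[a]); a += 1
--         else:
--             edges.append(vert[b]); b += 1
--     edges.extend(horiz[a:])
--     edges.extend(vert[b:])
--     return m * n, edges
-- ===== Notes on version B (the rewrite author's own statement) =====
-- stated objective: faster
-- what changed: Instead of collecting canonicalized edges per cell in a set and sorting, B builds the horizontal edges and the vertical edges in two separate staged passes (each already sorted) and combines them with a linear two-pointer merge, so no set and no sort is needed.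
import Mathlib
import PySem

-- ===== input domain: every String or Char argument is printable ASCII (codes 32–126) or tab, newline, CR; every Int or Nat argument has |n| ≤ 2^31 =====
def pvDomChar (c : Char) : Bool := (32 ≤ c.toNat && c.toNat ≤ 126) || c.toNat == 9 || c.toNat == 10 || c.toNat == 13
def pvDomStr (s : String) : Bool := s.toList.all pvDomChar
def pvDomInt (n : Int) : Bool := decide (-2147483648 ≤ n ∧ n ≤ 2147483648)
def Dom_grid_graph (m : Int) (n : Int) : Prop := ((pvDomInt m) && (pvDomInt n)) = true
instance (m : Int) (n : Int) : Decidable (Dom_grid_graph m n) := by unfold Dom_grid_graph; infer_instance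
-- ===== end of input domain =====

-- B builds the horizontal edges and the vertical edges in two separate staged passes (each
-- already sorted) and combines them with a linear two-pointer merge: no set, no sort (objective: faster).

-- ===== PORT A =====
def addUndirected (edges : PySem.Set (Int × Int)) (u : Int) (v : Int) : PySem.Set (Int × Int) :=
  if u = v then edges
  else if u > v then PySem.Set.add edges (v, u)
  else PySem.Set.add edges (u, v)

def grid_graph (m : Int) (n : Int) : Int × (List (Int × Int)) :=
  let edges : PySem.Set (Int × Int) :=
    (PySem.List.pyRange 0 m 1).foldl (fun edges i =>
      (PySem.List.pyRange 0 n 1).foldl (fun edges j =>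
        let edges := if i + 1 < m then addUndirected edges (i * n + j) ((i + 1) * n + j) else edges
        if j + 1 < n then addUndirected edges (i * n + j) (i * n + (j + 1)) else edges)
        edges)
      []
  (m * n, PySem.List.sorted2 edges (fun e => e.1) (fun e => e.2))

-- ===== PORT B =====
-- the two-pointer while-merge of Source B, transcribed as the recursion consuming the heads;
-- the comparison is Python's lexicographic tuple '<'
def gridMerge : List (Int × Int) → List (Int × Int) → List (Int × Int)
  | [], ys => ys
  | x :: xs, [] => x :: xs
  | x :: xs, y :: ys =>
      if x.1 < y.1 ∨ (x.1 = y.1 ∧ x.2 < y.2) then x :: gridMerge xs (y :: ys)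
      else y :: gridMerge (x :: xs) ys
termination_by xs ys => xs.length + ys.length

def grid_graph_alt (m : Int) (n : Int) : Int × (List (Int × Int)) :=
  if m ≤ 0 ∨ n ≤ 0 then (m * n, [])
  else
    let horiz := (PySem.List.pyRange 0 m 1).flatMap (fun i =>
      (PySem.List.pyRange 0 (n - 1) 1).map (fun j => (i * n + j, i * n + j + 1)))
    let vert := (PySem.List.pyRange 0 (m - 1) 1).flatMap (fun i =>
      (PySem.List.pyRange 0 n 1).map (fun j => (i * n + j, i * n + j + n)))
    (m * n, gridMerge horiz vert)

-- ===== PRECONDITION & SPEC =====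
def Spec_grid_graph (m : Int) (n : Int) (out : Int × (List (Int × Int))) : Prop := out = grid_graph_alt m n
instance (m : Int) (n : Int) (out : Int × (List (Int × Int))) : Decidable (Spec_grid_graph m n out) := by unfold Spec_grid_graph; infer_instance

-- ===== CLAIM =====
def Claim_equal_grid_graph : Prop := ∀ (m : Int) (n : Int), Dom_grid_graph m n → Spec_grid_graph m n (grid_graph m n)

-- ===== LEMMAS AND PROOFS =====

-- canonical edge list of one node in A's insertion order (down, right)
def nodeA (m n i j : Int) : List (Int × Int) :=
  (if i + 1 < m then [(i * n + j, i * n + j + n)] else []) ++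
  (if j + 1 < n then [(i * n + j, i * n + j + 1)] else [])

def allA (m n : Int) : List (Int × Int) :=
  (PySem.List.pyRange 0 m 1).flatMap (fun i => (PySem.List.pyRange 0 n 1).flatMap (nodeA m n i))

def horizL (m n : Int) : List (Int × Int) :=
  (PySem.List.pyRange 0 m 1).flatMap (fun i =>
    (PySem.List.pyRange 0 (n - 1) 1).map (fun j => (i * n + j, i * n + j + 1)))

def vertL (m n : Int) : List (Int × Int) :=
  (PySem.List.pyRange 0 (m - 1) 1).flatMap (fun i =>
    (PySem.List.pyRange 0 n 1).map (fun j => (i * n + j, i * n + j + n)))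

-- the sort key Python uses on 2-tuples: lexicographic
def lexKey (e : Int × Int) : Lex (Int × Int) := toLex (e.1, e.2)

lemma lexKey_lt_iff (a b : Int × Int) :
    lexKey a < lexKey b ↔ a.1 < b.1 ∨ (a.1 = b.1 ∧ a.2 < b.2) := by
  simp [lexKey, Prod.Lex.lt_iff]

lemma lexKey_inj (a b : Int × Int) (h : lexKey a = lexKey b) : a = b := by
  simpa [lexKey, Prod.ext_iff] using congrArg ofLex h

lemma gridA_closed (m n : Int) :
    grid_graph m n = (m * n, PySem.List.sorted2 ((allA m n).foldl PySem.Set.add []) (fun e => e.1) (fun e => e.2)) := by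
  simp only [grid_graph, allA]
  congr 2
  have hinner : ∀ (i : Int) (acc : PySem.Set (Int × Int)),
      (PySem.List.pyRange 0 n 1).foldl (fun edges j =>
        let edges := if i + 1 < m then addUndirected edges (i * n + j) ((i + 1) * n + j) else edges
        if j + 1 < n then addUndirected edges (i * n + j) (i * n + (j + 1)) else edges) acc
      = (PySem.List.pyRange 0 n 1).foldl (fun acc j => (nodeA m n i j).foldl PySem.Set.add acc) acc := by
    intro i acc
    apply PySem.List.foldl_congr_mem
    intro acc j hj
    rw [PySem.List.mem_pyRange_one] at hj
    have hr : (i + 1) * n + j = i * n + j + n := by ring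
    have hs : i * n + (j + 1) = i * n + j + 1 := by ring
    simp only [hr, hs, addUndirected, nodeA]
    have h1 : ¬ (i * n + j = i * n + j + n) := by omega
    have h2 : ¬ (i * n + j > i * n + j + n) := by omega
    have h3 : ¬ (i * n + j = i * n + j + 1) := by omega
    have h4 : ¬ (i * n + j > i * n + j + 1) := by omega
    simp only [if_neg h1, if_neg h2, if_neg h3, if_neg h4]
    split_ifs <;> simp [List.foldl]
  rw [PySem.List.foldl_congr_mem _ _
        (fun acc i => (PySem.List.pyRange 0 n 1).foldl (fun acc j => (nodeA m n i j).foldl PySem.Set.add acc) acc) _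
        (fun acc i _ => hinner i acc)]
  rw [List.foldl_flatMap]
  apply PySem.List.foldl_congr_mem
  intro acc i _
  exact List.foldl_flatMap.symm

lemma set_foldl_add_of_nodup {α : Type} [BEq α] [LawfulBEq α] (xs : List α) (s : List α)
    (h : (s ++ xs).Nodup) : xs.foldl PySem.Set.add s = s ++ xs := by
  induction xs generalizing s with
  | nil => simp
  | cons x xs ih =>
    have hx : x ∉ s := by
      intro hmem
      rcases List.nodup_append.mp h with ⟨-, -, hd⟩
      exact hd x hmem x List.mem_cons_self rfl
    have hadd : PySem.Set.add s x = s ++ [x] := by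
      simp [PySem.Set.add, hx]
    simp only [List.foldl_cons, hadd]
    rw [ih (s ++ [x]) (by simpa using h)]
    simp

-- splitting one interleaved flatMap into two staged flatMaps, up to permutation
lemma flatMap_append_perm {α β : Type} (l : List α) (f g : α → List β) :
    (l.flatMap (fun x => f x ++ g x)).Perm (l.flatMap f ++ l.flatMap g) := by
  induction l with
  | nil => simp
  | cons x l ih =>
    simp only [List.flatMap_cons, List.append_assoc]
    refine List.Perm.append_left _ ?_
    exact (ih.append_left _).trans (List.perm_append_comm_assoc _ _ _)

lemma flatMap_congr_mem {α β : Type} (l : List α) (f g : α → List β)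
    (h : ∀ x ∈ l, f x = g x) : l.flatMap f = l.flatMap g := by
  induction l with
  | nil => rfl
  | cons x l ih =>
    simp only [List.flatMap_cons, h x List.mem_cons_self,
      ih (fun y hy => h y (List.mem_cons_of_mem _ hy))]

lemma flatMap_single_map {α β : Type} (l : List α) (f : α → β) :
    l.flatMap (fun x => [f x]) = l.map f := by
  induction l with
  | nil => rfl
  | cons x l ih => simp [ih]

lemma pyRange_nil (a b : Int) (h : b ≤ a) : PySem.List.pyRange a b 1 = [] := by
  apply List.eq_nil_of_length_eq_zero
  rw [PySem.List.length_pyRange_one]; omega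

lemma pyRange_last (a b : Int) (h : a < b) :
    PySem.List.pyRange a b 1 = PySem.List.pyRange a (b - 1) 1 ++ [b - 1] := by
  rw [PySem.List.pyRange_one_append a (b - 1) b (by omega) (by omega)]
  congr 1
  rw [PySem.List.pyRange_one_cons (by omega), pyRange_nil _ _ (by omega)]

-- A's right-edges, gathered in node order, are exactly the horizontal pass of B
lemma right_eq_horiz (m n : Int) (hn : 0 < n) :
    (PySem.List.pyRange 0 m 1).flatMap (fun i =>
      (PySem.List.pyRange 0 n 1).flatMap (fun j =>
        if j + 1 < n then [(i * n + j, i * n + j + 1)] else [])) = horizL m n := by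
  unfold horizL
  apply flatMap_congr_mem
  intro i _
  rw [pyRange_last 0 n hn, List.flatMap_append]
  have h2 : (([(n - 1 : Int)]).flatMap (fun j =>
      if j + 1 < n then [((i * n + j : Int), i * n + j + 1)] else [])) = [] := by
    simp only [List.flatMap_cons, List.flatMap_nil, List.append_nil]
    rw [if_neg (by omega)]
  rw [h2, List.append_nil]
  rw [flatMap_congr_mem _ _ (fun j => [(i * n + j, i * n + j + 1)])
        (fun j hj => by rw [if_pos (by rw [PySem.List.mem_pyRange_one] at hj; omega)])]
  exact flatMap_single_map _ _

-- A's down-edges, gathered in node order, are exactly the vertical pass of B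
lemma down_eq_vert (m n : Int) (hm : 0 < m) :
    (PySem.List.pyRange 0 m 1).flatMap (fun i =>
      (PySem.List.pyRange 0 n 1).flatMap (fun j =>
        if i + 1 < m then [(i * n + j, i * n + j + n)] else [])) = vertL m n := by
  unfold vertL
  rw [pyRange_last 0 m hm, List.flatMap_append]
  have h2 : (([(m - 1 : Int)]).flatMap (fun i =>
      (PySem.List.pyRange 0 n 1).flatMap (fun j =>
        if i + 1 < m then [((i * n + j : Int), i * n + j + n)] else []))) = [] := by
    simp only [List.flatMap_cons, List.flatMap_nil, List.append_nil]
    rw [flatMap_congr_mem _ _ (fun _ => []) (fun j _ => by rw [if_neg (by omega)])]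
    simp
  rw [h2, List.append_nil]
  apply flatMap_congr_mem
  intro i hi
  rw [PySem.List.mem_pyRange_one] at hi
  rw [flatMap_congr_mem _ _ (fun j => [(i * n + j, i * n + j + n)])
        (fun j _ => by rw [if_pos (by omega)])]
  exact flatMap_single_map _ _

lemma perm_allA (m n : Int) (hm : 0 < m) (hn : 0 < n) :
    (horizL m n ++ vertL m n).Perm (allA m n) := by
  have s1 : (allA m n).Perm ((PySem.List.pyRange 0 m 1).flatMap (fun i =>
      ((PySem.List.pyRange 0 n 1).flatMap (fun j =>
        if i + 1 < m then [(i * n + j, i * n + j + n)] else [])) ++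
      ((PySem.List.pyRange 0 n 1).flatMap (fun j =>
        if j + 1 < n then [(i * n + j, i * n + j + 1)] else [])))) := by
    unfold allA
    refine List.Perm.flatMap_left _ (fun i _ => ?_)
    simpa [nodeA] using flatMap_append_perm (PySem.List.pyRange 0 n 1)
      (fun j => if i + 1 < m then [(i * n + j, i * n + j + n)] else [])
      (fun j => if j + 1 < n then [(i * n + j, i * n + j + 1)] else [])
  have h1 : (allA m n).Perm (vertL m n ++ horizL m n) :=
    s1.trans ((flatMap_append_perm _ _ _).trans
      (by rw [down_eq_vert m n hm, right_eq_horiz m n hn]))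
  exact List.perm_append_comm.trans h1.symm

lemma gridMerge_perm (xs ys : List (Int × Int)) : (gridMerge xs ys).Perm (xs ++ ys) := by
  induction xs, ys using gridMerge.induct with
  | case1 ys => simp [gridMerge]
  | case2 x xs => simp [gridMerge]
  | case3 x xs y ys hc ih =>
    rw [gridMerge, if_pos hc]
    exact (ih.cons x)
  | case4 x xs y ys hc ih =>
    rw [gridMerge, if_neg hc]
    exact (ih.cons y).trans List.perm_middle.symm

lemma gridMerge_pairwise (xs ys : List (Int × Int))
    (hx : xs.Pairwise (fun a b => lexKey a < lexKey b))
    (hy : ys.Pairwise (fun a b => lexKey a < lexKey b))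
    (hd : ∀ x ∈ xs, ∀ y ∈ ys, lexKey x ≠ lexKey y) :
    (gridMerge xs ys).Pairwise (fun a b => lexKey a < lexKey b) := by
  induction xs, ys using gridMerge.induct with
  | case1 ys => simpa [gridMerge] using hy
  | case2 x xs => simpa [gridMerge] using hx
  | case3 x xs y ys hc ih =>
    rw [gridMerge, if_pos hc]
    have hxy : lexKey x < lexKey y := (lexKey_lt_iff x y).mpr hc
    refine List.pairwise_cons.mpr ⟨?_, ih hx.tail hy
      (fun a ha b hb => hd a (List.mem_cons_of_mem _ ha) b hb)⟩
    intro z hz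
    have hz' : z ∈ xs ++ (y :: ys) := (gridMerge_perm _ _).mem_iff.mp hz
    rcases List.mem_append.mp hz' with h | h
    · exact (List.pairwise_cons.mp hx).1 z h
    · rcases List.mem_cons.mp h with rfl | h
      · exact hxy
      · exact hxy.trans ((List.pairwise_cons.mp hy).1 z h)
  | case4 x xs y ys hc ih =>
    rw [gridMerge, if_neg hc]
    have hne : lexKey x ≠ lexKey y := hd x List.mem_cons_self y List.mem_cons_self
    have hyx : lexKey y < lexKey x := by
      rcases lt_trichotomy (lexKey x) (lexKey y) with h | h | h
      · exact absurd ((lexKey_lt_iff x y).mp h) hc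
      · exact absurd h hne
      · exact h
    refine List.pairwise_cons.mpr ⟨?_, ih hx hy.tail
      (fun a ha b hb => hd a ha b (List.mem_cons_of_mem _ hb))⟩
    intro z hz
    have hz' : z ∈ (x :: xs) ++ ys := (gridMerge_perm _ _).mem_iff.mp hz
    rcases List.mem_append.mp hz' with h | h
    · rcases List.mem_cons.mp h with rfl | h
      · exact hyx
      · exact hyx.trans ((List.pairwise_cons.mp hx).1 z h)
    · exact (List.pairwise_cons.mp hy).1 z h

lemma pairwise_horiz (m n : Int) : (horizL m n).Pairwise (fun a b => lexKey a < lexKey b) := by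
  unfold horizL
  rw [List.pairwise_flatMap]
  constructor
  · intro i _
    rw [List.pairwise_map]
    refine (PySem.List.pairwise_lt_pyRange_one 0 (n - 1)).imp ?_
    intro j j' h
    rw [lexKey_lt_iff]; left; omega
  · refine (PySem.List.pairwise_lt_pyRange_one 0 m).imp ?_
    intro i i' hii x hx y hy
    simp only [List.mem_map] at hx hy
    obtain ⟨j, hj, rfl⟩ := hx
    obtain ⟨j', hj', rfl⟩ := hy
    rw [PySem.List.mem_pyRange_one] at hj hj'
    have hmul : (i + 1) * n ≤ i' * n :=
      mul_le_mul_of_nonneg_right (by omega) (by omega)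
    have he : (i + 1) * n = i * n + n := by ring
    rw [lexKey_lt_iff]; left; simp only; omega

lemma pairwise_vert (m n : Int) : (vertL m n).Pairwise (fun a b => lexKey a < lexKey b) := by
  unfold vertL
  rw [List.pairwise_flatMap]
  constructor
  · intro i _
    rw [List.pairwise_map]
    refine (PySem.List.pairwise_lt_pyRange_one 0 n).imp ?_
    intro j j' h
    rw [lexKey_lt_iff]; left; omega
  · refine (PySem.List.pairwise_lt_pyRange_one 0 (m - 1)).imp ?_
    intro i i' hii x hx y hy
    simp only [List.mem_map] at hx hy
    obtain ⟨j, hj, rfl⟩ := hx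
    obtain ⟨j', hj', rfl⟩ := hy
    rw [PySem.List.mem_pyRange_one] at hj hj'
    have hmul : (i + 1) * n ≤ i' * n :=
      mul_le_mul_of_nonneg_right (by omega) (by omega)
    have he : (i + 1) * n = i * n + n := by ring
    rw [lexKey_lt_iff]; left; simp only; omega

lemma disjoint_hv (m n : Int) :
    ∀ x ∈ horizL m n, ∀ y ∈ vertL m n, lexKey x ≠ lexKey y := by
  intro x hx y hy heq
  have hxy := lexKey_inj _ _ heq
  simp only [horizL, List.mem_flatMap, List.mem_map] at hx
  simp only [vertL, List.mem_flatMap, List.mem_map] at hy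
  obtain ⟨i, hi, j, hj, rfl⟩ := hx
  obtain ⟨i', hi', j', hj', rfl⟩ := hy
  rw [PySem.List.mem_pyRange_one] at hj hj'
  have h1 : i * n + j = i' * n + j' := congrArg Prod.fst hxy
  have h2 : i * n + j + 1 = i' * n + j' + n := congrArg Prod.snd hxy
  omega

lemma nodup_merge_input (m n : Int) : (horizL m n ++ vertL m n).Nodup := by
  have hh : (horizL m n).Nodup :=
    (pairwise_horiz m n).imp (fun h heq => by subst heq; exact absurd h (lt_irrefl _))
  have hv : (vertL m n).Nodup :=
    (pairwise_vert m n).imp (fun h heq => by subst heq; exact absurd h (lt_irrefl _))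
  rw [List.nodup_append]
  refine ⟨hh, hv, ?_⟩
  intro x hx y hy heq
  exact disjoint_hv m n x hx y hy (by rw [heq])

lemma sorted2_eq_sorted_lex (xs : List (Int × Int)) :
    PySem.List.sorted2 xs (fun e => e.1) (fun e => e.2) = PySem.List.sorted xs lexKey := by
  unfold PySem.List.sorted2 PySem.List.sorted
  simp only [Bool.false_eq_true, if_false]
  congr 1
  funext acc x
  congr 1
  funext a b
  by_cases h1 : a.1 < b.1 <;> by_cases h2 : b.1 < a.1 <;> by_cases h3 : a.2 < b.2 <;>
    simp [h1, h2, h3, lexKey, Prod.Lex.lt_iff] <;> omega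

-- ===== VERDICT =====
theorem grid_graph_spec : Claim_equal_grid_graph := by
  intro m n _
  unfold Spec_grid_graph grid_graph_alt
  by_cases hdeg : m ≤ 0 ∨ n ≤ 0
  · rw [if_pos hdeg, gridA_closed]
    have hA : allA m n = [] := by
      rcases hdeg with h | h
      · simp [allA, pyRange_nil 0 m h]
      · simp [allA, pyRange_nil 0 n h]
    rw [hA]
    rfl
  · rw [if_neg hdeg]
    have hm : 0 < m := by omega
    have hn : 0 < n := by omega
    rw [gridA_closed]
    simp only [Prod.mk.injEq, true_and]
    have hperm : (gridMerge (horizL m n) (vertL m n)).Perm (allA m n) :=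
      (gridMerge_perm _ _).trans (perm_allA m n hm hn)
    have hnodupA : (allA m n).Nodup := ((perm_allA m n hm hn).nodup (nodup_merge_input m n))
    rw [set_foldl_add_of_nodup (allA m n) [] (by simpa using hnodupA)]
    simp only [List.nil_append]
    rw [sorted2_eq_sorted_lex]
    exact PySem.List.sorted_eq_of_perm_of_pairwise_lt _ _ _ hperm
      (gridMerge_pairwise _ _ (pairwise_horiz m n) (pairwise_vert m n) (disjoint_hv m n))
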